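-- pv_equiv track=rewrite | github.com/Macmilan24/a2sv_onboarding- | A2SV Special Mini Contest 19-May-2025/A - Stairway to Goodness 358045.py | max_good_array_length
-- ===== SOURCE A (Python) =====
-- def max_good_array_length(l, r):
--     left, right = 1, 2 * (10**9)
--     max_len = 1
--     while left <= right:
--         mid = (left + right) // 2
--         total = (mid - 1) * mid // 2
--         if l + total <= r:
--             max_len = mid
--             left = mid + 1
--         else:
--             right = mid - 1
--     return max_len
-- ===== SOURCE B (Python) =====
-- def max_good_array_length(l, r):
--     # Closed form: the answer is the largest n in [1, 2*10**9] with n*(n-1)//2 <= r - l.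
--     d = r - l
--     if d < 0:
--         return 1
--     # Integer sqrt of s = 8*d + 1 by Newton's method (no imports, matching A's module).
--     s = 8 * d + 1
--     x, y = s, (s + 1) // 2
--     while y < x:
--         x, y = y, (y + s // y) // 2
--     # x = isqrt(s); largest m with m*(m+1)//2 <= d is (x - 1) // 2, answer is m + 1.
--     m = (x - 1) // 2
--     return max(1, min(2 * 10**9, m + 1))
-- ===== Notes on version B (the rewrite author's own statement) =====
-- stated objective: alternative
-- what changed: Replaces A's ~31-iteration binary search over [1, 2*10^9] with a closed form: the answer is 1 + the largest m with m*(m+1)/2 <= r-l, computed from a Newton-iteration integer square root of 8*(r-l)+1 (no math import, matching A's module), clamped to [1, 2*10^9].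
import Mathlib
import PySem

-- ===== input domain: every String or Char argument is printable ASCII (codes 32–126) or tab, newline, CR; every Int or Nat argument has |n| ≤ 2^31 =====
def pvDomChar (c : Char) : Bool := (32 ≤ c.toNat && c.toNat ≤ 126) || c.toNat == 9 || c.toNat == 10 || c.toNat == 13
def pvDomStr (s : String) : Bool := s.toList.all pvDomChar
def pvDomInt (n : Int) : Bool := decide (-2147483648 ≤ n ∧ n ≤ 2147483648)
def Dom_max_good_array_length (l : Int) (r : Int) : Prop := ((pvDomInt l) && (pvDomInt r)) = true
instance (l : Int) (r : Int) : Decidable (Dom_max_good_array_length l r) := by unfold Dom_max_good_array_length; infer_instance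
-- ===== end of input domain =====

-- B replaces A's 31-step binary search by a closed form: the answer is 1 + (the largest m with
-- m*(m+1)/2 <= r-l), obtained from an integer square root computed by Newton's method.

-- ===== PORT A =====
-- A's while-loop: state (left, right, max_len); terminates because right+1-left shrinks.
def bsLoop (l : Int) (r : Int) (left : Int) (right : Int) (maxLen : Int) : Int :=
  if h : left ≤ right then
    let mid := PySem.Int.floordiv (left + right) 2
    let total := PySem.Int.floordiv ((mid - 1) * mid) 2
    if l + total ≤ r then bsLoop l r (mid + 1) right mid
    else bsLoop l r left (mid - 1) maxLen
  else maxLen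
termination_by (right + 1 - left).toNat
decreasing_by
  · have hmid := PySem.Int.floordiv_two_mid_bounds h
    omega
  · have hmid := PySem.Int.floordiv_two_mid_bounds h
    omega

def max_good_array_length (l : Int) (r : Int) : Int :=
  bsLoop l r 1 2000000000 1

-- ===== PORT B =====
-- B's Newton `while y < x` loop (all values are provably nonnegative Python ints, kept as Nat).
def isqrtLoop (s : Nat) (x : Nat) (y : Nat) : Nat :=
  if y < x then isqrtLoop s y ((y + s / y) / 2) else x
termination_by x

def max_good_array_length_alt (l : Int) (r : Int) : Int :=
  let d := r - l
  if d < 0 then 1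
  else
    let s := (8 * d + 1).toNat
    let x := isqrtLoop s s ((s + 1) / 2)
    let m := PySem.Int.floordiv ((x : Int) - 1) 2
    max 1 (min 2000000000 (m + 1))

-- ===== PRECONDITION & SPEC =====
def Spec_max_good_array_length (l : Int) (r : Int) (out : Int) : Prop := out = max_good_array_length_alt l r
instance (l : Int) (r : Int) (out : Int) : Decidable (Spec_max_good_array_length l r out) := by unfold Spec_max_good_array_length; infer_instance

-- ===== CLAIM (what is proved, stated in full; the proofs are below) =====
def Claim_equal_max_good_array_length : Prop := ∀ (l : Int) (r : Int), Dom_max_good_array_length l r → Spec_max_good_array_length l r (max_good_array_length l r)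

-- ===== LEMMAS AND PROOFS =====

-- (n-1)*n is monotone on n ≥ 1.
lemma tri_mono (a b : Int) (h1 : 1 ≤ a) (h2 : a ≤ b) : (a - 1) * a ≤ (b - 1) * b := by nlinarith

-- Both programs' results are `max 1 L` where L ∈ [0, 2*10^9] is the frontier of the
-- downward-closed predicate (n-1)*n ≤ 2*(r-l); such an L is unique.
lemma frontier_uniq (D L L' : Int)
    (hL0 : 0 ≤ L) (hLR : L ≤ 2000000000) (hL'0 : 0 ≤ L') (hL'R : L' ≤ 2000000000)
    (h1 : ∀ n, 1 ≤ n → n ≤ L → (n - 1) * n ≤ 2 * D)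
    (h2 : ∀ n, L < n → n ≤ 2000000000 → ¬ ((n - 1) * n ≤ 2 * D))
    (h1' : ∀ n, 1 ≤ n → n ≤ L' → (n - 1) * n ≤ 2 * D)
    (h2' : ∀ n, L' < n → n ≤ 2000000000 → ¬ ((n - 1) * n ≤ 2 * D)) : L = L' := by
  rcases lt_trichotomy L L' with h | h | h
  · exact absurd (h1' (L + 1) (by omega) (by omega)) (h2 (L + 1) (by omega) (by omega))
  · exact h
  · exact absurd (h1 (L' + 1) (by omega) (by omega)) (h2' (L' + 1) (by omega) (by omega))

-- Newton step never drops below the integer square root.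
lemma newton_lower (s x : Nat) (hx : 1 ≤ x) : Nat.sqrt s ≤ (x + s / x) / 2 := by
  set k := Nat.sqrt s with hk
  have hks : k * k ≤ s := by have := Nat.sqrt_le' s; simpa [pow_two] using this
  have hmod := Nat.div_add_mod s x
  have hmlt : s % x < x := Nat.mod_lt _ (by omega)
  rw [Nat.le_div_iff_mul_le (by norm_num)]
  by_contra hcon
  have hcon' : x + s / x < k * 2 := by omega
  have h1 : (k : Int) * k ≤ (x : Int) * ((s / x : Nat) : Int) + ((s % x : Nat) : Int) := by
    exact_mod_cast hks.trans_eq (by omega)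
  have h2 : ((s % x : Nat) : Int) < (x : Int) := by exact_mod_cast hmlt
  have h3 : (x : Int) + ((s / x : Nat) : Int) < (k : Int) * 2 := by exact_mod_cast hcon'
  have h4 : (1 : Int) ≤ (x : Int) := by exact_mod_cast hx
  nlinarith [sq_nonneg ((k : Int) - (x : Int))]

-- Above the integer square root, the Newton step strictly decreases.
lemma newton_upper (s x : Nat) (hx : Nat.sqrt s < x) : (x + s / x) / 2 < x := by
  have hxpos : 0 < x := by omega
  have hs : s < x * x := by have := Nat.sqrt_lt'.mp hx; simpa [pow_two] using this
  have hq : s / x < x := (Nat.div_lt_iff_lt_mul hxpos).mpr hs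
  omega

lemma isqrtLoop_eq (s : Nat) (x : Nat) (h : Nat.sqrt s ≤ x) :
    isqrtLoop s x ((x + s / x) / 2) = Nat.sqrt s := by
  induction x using Nat.strong_induction_on with
  | _ x ih =>
    rw [isqrtLoop]
    split
    · next hlt =>
      exact ih _ hlt (newton_lower s x (Nat.zero_lt_of_lt hlt))
    · next hge =>
      rcases eq_or_lt_of_le h with heq | hlt
      · omega
      · exact absurd (newton_upper s x hlt) hge

lemma isqrt_eq (s : Nat) (hs : 1 ≤ s) : isqrtLoop s s ((s + 1) / 2) = Nat.sqrt s := by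
  have h : (s + 1) / 2 = (s + s / s) / 2 := by rw [Nat.div_self hs]
  rw [h]
  exact isqrtLoop_eq s s (Nat.sqrt_le_self s)

lemma alt_char (l r : Int) : ∃ L, max_good_array_length_alt l r = max 1 L ∧ 0 ≤ L ∧ L ≤ 2000000000 ∧
    (∀ n, 1 ≤ n → n ≤ L → (n - 1) * n ≤ 2 * (r - l)) ∧
    (∀ n, L < n → n ≤ 2000000000 → ¬ ((n - 1) * n ≤ 2 * (r - l))) := by
  unfold max_good_array_length_alt
  set d := r - l with hd
  by_cases hneg : d < 0
  · refine ⟨0, by simp [hneg], by norm_num, by norm_num, ?_, ?_⟩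
    · intro n h1 h2; omega
    · intro n h1 _ hP
      nlinarith
  · have hd0 : 0 ≤ d := by omega
    have hs1 : 1 ≤ (8 * d + 1).toNat := by omega
    simp only [if_neg hneg]
    rw [isqrt_eq _ hs1]
    set k := Nat.sqrt ((8 * d + 1).toNat) with hk
    have hcast : ((8 * d + 1).toNat : Int) = 8 * d + 1 := by omega
    have hk1 : (k : Int) * k ≤ 8 * d + 1 := by
      have := Nat.sqrt_le' ((8 * d + 1).toNat)
      rw [pow_two] at this
      calc ((k : Int)) * k = ((k * k : Nat) : Int) := by push_cast; ring
        _ ≤ (((8 * d + 1).toNat : Nat) : Int) := by exact_mod_cast this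
        _ = 8 * d + 1 := hcast
    have hk2 : 8 * d + 1 < ((k : Int) + 1) * (k + 1) := by
      have := Nat.lt_succ_sqrt' ((8 * d + 1).toNat)
      rw [pow_two] at this
      calc (8 : Int) * d + 1 = ((8 * d + 1).toNat : Int) := hcast.symm
        _ < (((k + 1) * (k + 1) : Nat) : Int) := by exact_mod_cast this
        _ = ((k : Int) + 1) * (k + 1) := by push_cast; ring
    have hkpos : 1 ≤ (k : Int) := by nlinarith
    rw [PySem.Int.floordiv_eq_ediv_of_pos (by norm_num)]
    set m := ((k : Int) - 1) / 2 with hm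
    have hmb : 2 * m ≤ (k : Int) - 1 ∧ (k : Int) - 1 ≤ 2 * m + 1 := by omega
    have hm0 : 0 ≤ m := by omega
    have key1 : m * (m + 1) ≤ 2 * d := by nlinarith
    have key2 : 2 * d < (m + 1) * (m + 2) := by nlinarith
    refine ⟨min 2000000000 (m + 1), rfl, by omega, by omega, ?_, ?_⟩
    · intro n h1 h2
      have hn : n ≤ m + 1 := by omega
      have := tri_mono n (m + 1) h1 hn
      nlinarith
    · intro n h1 h2 hP
      have hn : m + 2 ≤ n := by omega
      have := tri_mono (m + 2) n (by omega) hn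
      nlinarith


lemma bsLoop_char (k : Nat) : ∀ (l r left right maxLen : Int),
    (right + 1 - left).toNat ≤ k →
    1 ≤ left → left ≤ right + 1 → right ≤ 2000000000 →
    maxLen = max 1 (left - 1) →
    (∀ n, 1 ≤ n → n < left → (n - 1) * n ≤ 2 * (r - l)) →
    (∀ n, right < n → n ≤ 2000000000 → ¬ ((n - 1) * n ≤ 2 * (r - l))) →
    ∃ L, bsLoop l r left right maxLen = max 1 L ∧ 0 ≤ L ∧ L ≤ 2000000000 ∧
      (∀ n, 1 ≤ n → n ≤ L → (n - 1) * n ≤ 2 * (r - l)) ∧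
      (∀ n, L < n → n ≤ 2000000000 → ¬ ((n - 1) * n ≤ 2 * (r - l))) := by
  induction k with
  | zero =>
    intro l r left right maxLen hk h1 h2 h3 hm hlow hhigh
    have hgt : ¬ left ≤ right := by omega
    rw [bsLoop, dif_neg hgt, hm]
    exact ⟨left - 1, rfl, by omega, by omega, fun n hn1 hn2 => hlow n hn1 (by omega),
      fun n hn1 hn2 => hhigh n (by omega) hn2⟩
  | succ k ih =>
    intro l r left right maxLen hk h1 h2 h3 hm hlow hhigh
    by_cases hle : left ≤ right
    · rw [bsLoop, dif_pos hle]
      have hmid := PySem.Int.floordiv_two_mid_bounds hle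
      set mid := PySem.Int.floordiv (left + right) 2 with hmiddef
      have heven : (2 : Int) ∣ (mid - 1) * mid := by
        rcases Int.even_or_odd mid with he | ho
        · exact Dvd.dvd.mul_left he.two_dvd _
        · exact Dvd.dvd.mul_right (Int.even_sub_one.mpr (Int.not_even_iff_odd.mpr ho)).two_dvd _
      have htot : 2 * PySem.Int.floordiv ((mid - 1) * mid) 2 = (mid - 1) * mid := by
        rw [PySem.Int.floordiv_eq_ediv_of_pos (by norm_num)]
        exact Int.mul_ediv_cancel' heven
      set total := PySem.Int.floordiv ((mid - 1) * mid) 2 with htotdef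
      by_cases hcond : l + total ≤ r
      · rw [if_pos hcond]
        have hP : (mid - 1) * mid ≤ 2 * (r - l) := by linarith
        refine ih l r (mid + 1) right mid (by omega) (by omega) (by omega) h3 (by omega) ?_ hhigh
        intro n hn1 hn2
        have := tri_mono n mid hn1 (by omega)
        linarith
      · rw [if_neg hcond]
        have hnP : 2 * (r - l) < (mid - 1) * mid := by linarith
        refine ih l r left (mid - 1) maxLen (by omega) h1 (by omega) (by omega) hm hlow ?_
        intro n hn1 hn2 hP
        have := tri_mono mid n (by omega) (by omega)
        linarith
    · rw [bsLoop, dif_neg hle, hm]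
      exact ⟨left - 1, rfl, by omega, by omega, fun n hn1 hn2 => hlow n hn1 (by omega),
        fun n hn1 hn2 => hhigh n (by omega) hn2⟩

-- ===== VERDICT (by name: the statement is the Claim_ definition above) =====
theorem max_good_array_length_spec : Claim_equal_max_good_array_length := by
  intro l r _
  unfold Spec_max_good_array_length max_good_array_length
  obtain ⟨LA, hAeq, hA0, hAR, hA1, hA2⟩ :=
    bsLoop_char 2000000000 l r 1 2000000000 1 (by norm_num) (by norm_num) (by norm_num)
      (by norm_num) (by norm_num) (by omega) (by omega)
  obtain ⟨LB, hBeq, hB0, hBR, hB1, hB2⟩ := alt_char l r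
  rw [hAeq, hBeq, frontier_uniq (r - l) LA LB hA0 hAR hB0 hBR hA1 hA2 hB1 hB2]
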